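-- pv_equiv track=rewrite | github.com/stavandieee/ovac | coordination/verifiers/hybrid_verifier.py | _suggest_correction
-- ===== SOURCE A (Python) =====
-- from typing import Dict, List, Optional, Tuple
--
-- def _suggest_correction(
--     primitive: dict, violations: List[str]
-- ) -> Optional[dict]:
--     """Suggest parameter corrections for common violations."""
--     corrections = {}
--
--     for v in violations:
--         if "NFZ_VIOLATION" in v or "NFZ_PATH" in v:
--             corrections["suggestion"] = "Reroute around no-fly zone"
--         elif "BATTERY_INSUFFICIENT" in v:
--             corrections["suggestion"] = "Return to home or reduce mission scope"
--         elif "ALTITUDE" in v: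
--             corrections["suggestion"] = "Adjust altitude to within [5, 120] meters"
--         elif "OUT_OF_BOUNDS" in v:
--             corrections["suggestion"] = "Clamp target to arena boundaries"
--         elif "COLLISION_RISK" in v:
--             corrections["suggestion"] = "Add offset to avoid other drone"
--
--     return corrections if corrections else None
-- ===== SOURCE B (Python) =====
-- _RULES = [
--     (("NFZ_VIOLATION", "NFZ_PATH"), "Reroute around no-fly zone"),
--     (("BATTERY_INSUFFICIENT",), "Return to home or reduce mission scope"),
--     (("ALTITUDE",), "Adjust altitude to within [5, 120] meters"),
--     (("OUT_OF_BOUNDS",), "Clamp target to arena boundaries"),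
--     (("COLLISION_RISK",), "Add offset to avoid other drone"),
-- ]
--
--
-- def _classify(v):
--     return next((msg for kws, msg in _RULES if any(k in v for k in kws)), None)
--
--
-- def _suggest_correction(primitive, violations):
--     # last matching violation wins, so scan back-to-front and stop at the first match
--     for v in reversed(violations):
--         msg = _classify(v)
--         if msg is not None:
--             return {"suggestion": msg}
--     return None
-- ===== Notes on version B (the rewrite author's own statement) =====
-- stated objective: idiomatic
-- what changed: Instead of a forward pass mutating a dict with last-match-wins elif overwrites, B scans the violations back-to-front and returns immediately at the first violation matching a keyword rule, building the dict once; equivalence rests on last-match-forward = first-match-backward.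
import Mathlib
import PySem

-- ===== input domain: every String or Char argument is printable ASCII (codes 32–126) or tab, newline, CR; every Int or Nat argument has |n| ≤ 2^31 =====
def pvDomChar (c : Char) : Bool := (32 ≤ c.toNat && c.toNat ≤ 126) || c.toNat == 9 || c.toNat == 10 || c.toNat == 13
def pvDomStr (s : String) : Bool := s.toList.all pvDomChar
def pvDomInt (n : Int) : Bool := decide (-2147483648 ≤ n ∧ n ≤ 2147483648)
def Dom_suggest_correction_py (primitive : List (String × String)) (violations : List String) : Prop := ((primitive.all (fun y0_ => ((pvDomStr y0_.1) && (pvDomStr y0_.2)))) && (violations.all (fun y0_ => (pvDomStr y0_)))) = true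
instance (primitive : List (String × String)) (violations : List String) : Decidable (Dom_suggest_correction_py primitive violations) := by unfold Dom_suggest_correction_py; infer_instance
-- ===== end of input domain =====

-- B scans the violations back-to-front and returns at the first keyword match instead of A's
-- forward pass that keeps overwriting a dict (last match wins); idiomatic, same cost.

-- ===== PORT A =====
def suggest_correction_py (primitive : List (String × String)) (violations : List String) : Option (List (String × String)) :=
  let corrections : PySem.Dict String String :=
    violations.foldl (fun d v =>
      if PySem.Str.isIn "NFZ_VIOLATION" v || PySem.Str.isIn "NFZ_PATH" v then
        d.insert "suggestion" "Reroute around no-fly zone"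
      else if PySem.Str.isIn "BATTERY_INSUFFICIENT" v then
        d.insert "suggestion" "Return to home or reduce mission scope"
      else if PySem.Str.isIn "ALTITUDE" v then
        d.insert "suggestion" "Adjust altitude to within [5, 120] meters"
      else if PySem.Str.isIn "OUT_OF_BOUNDS" v then
        d.insert "suggestion" "Clamp target to arena boundaries"
      else if PySem.Str.isIn "COLLISION_RISK" v then
        d.insert "suggestion" "Add offset to avoid other drone"
      else d) PySem.Dict.empty
  if corrections.items = [] then none else some corrections.items

-- ===== PORT B =====
def sc_rules : List (List String × String) :=
  [ (["NFZ_VIOLATION", "NFZ_PATH"], "Reroute around no-fly zone"),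
    (["BATTERY_INSUFFICIENT"], "Return to home or reduce mission scope"),
    (["ALTITUDE"], "Adjust altitude to within [5, 120] meters"),
    (["OUT_OF_BOUNDS"], "Clamp target to arena boundaries"),
    (["COLLISION_RISK"], "Add offset to avoid other drone") ]

-- _classify: first rule one of whose keywords is a substring of v
def sc_classify (v : String) : Option String :=
  sc_rules.findSome? (fun e => if e.1.any (fun k => PySem.Str.isIn k v) then some e.2 else none)

-- the for-loop over reversed(violations) with early return
def sc_scan : List String → Option (List (String × String))
  | [] => none
  | v :: rest =>
    match sc_classify v with
    | some m => some [("suggestion", m)]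
    | none => sc_scan rest

def suggest_correction_py_alt (primitive : List (String × String)) (violations : List String) : Option (List (String × String)) :=
  sc_scan violations.reverse

-- ===== PRECONDITION & SPEC =====
def Spec_suggest_correction_py (primitive : List (String × String)) (violations : List String) (out : Option (List (String × String))) : Prop := out = suggest_correction_py_alt primitive violations
instance (primitive : List (String × String)) (violations : List String) (out : Option (List (String × String))) : Decidable (Spec_suggest_correction_py primitive violations out) := by unfold Spec_suggest_correction_py; infer_instance

-- ===== CLAIM (what is proved, stated in full; the proofs are below) =====
def Claim_equal_suggest_correction_py : Prop := ∀ (primitive : List (String × String)) (violations : List String), Dom_suggest_correction_py primitive violations → Spec_suggest_correction_py primitive violations (suggest_correction_py primitive violations)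

-- ===== LEMMAS AND PROOFS =====

-- the dict A maintains, as a function of the last matched message
def sc_dictOf : Option String → PySem.Dict String String
  | none => PySem.Dict.empty
  | some m => PySem.Dict.mk [("suggestion", m)]

def sc_stepA (d : PySem.Dict String String) (v : String) : PySem.Dict String String :=
  if PySem.Str.isIn "NFZ_VIOLATION" v || PySem.Str.isIn "NFZ_PATH" v then
    d.insert "suggestion" "Reroute around no-fly zone"
  else if PySem.Str.isIn "BATTERY_INSUFFICIENT" v then
    d.insert "suggestion" "Return to home or reduce mission scope"
  else if PySem.Str.isIn "ALTITUDE" v then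
    d.insert "suggestion" "Adjust altitude to within [5, 120] meters"
  else if PySem.Str.isIn "OUT_OF_BOUNDS" v then
    d.insert "suggestion" "Clamp target to arena boundaries"
  else if PySem.Str.isIn "COLLISION_RISK" v then
    d.insert "suggestion" "Add offset to avoid other drone"
  else d

theorem sc_insert_dictOf (o : Option String) (m : String) :
    (sc_dictOf o).insert "suggestion" m = sc_dictOf (some m) := by
  cases o <;> simp [sc_dictOf, PySem.Dict.insert, PySem.Dict.empty]

theorem sc_stepA_eq (d : PySem.Dict String String) (v : String) :
    sc_stepA d v = match sc_classify v with
      | some m => d.insert "suggestion" m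
      | none => d := by
  simp only [sc_stepA, sc_classify, sc_rules, List.findSome?]
  split_ifs <;> simp_all

-- A's forward last-wins fold equals the first match of the reversed list (falling back to o)
theorem sc_foldl_eq_scan (vs : List String) (o : Option String) :
    vs.foldl sc_stepA (sc_dictOf o)
      = sc_dictOf (match vs.reverse.findSome? sc_classify with
                   | some m => some m
                   | none => o) := by
  induction vs generalizing o with
  | nil => rfl
  | cons v vs ih =>
    simp only [List.foldl_cons, sc_stepA_eq, List.reverse_cons]
    cases h : sc_classify v with
    | none =>
      rw [show (match (none : Option String) with
            | some m => sc_dictOf o |>.insert "suggestion" m | none => sc_dictOf o) = sc_dictOf o from rfl]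
      rw [ih o, List.findSome?_append]
      cases hv : vs.reverse.findSome? sc_classify <;> simp [h, hv, List.findSome?]
    | some m =>
      rw [show (match (some m : Option String) with
            | some m => sc_dictOf o |>.insert "suggestion" m | none => sc_dictOf o)
          = sc_dictOf (some m) from sc_insert_dictOf o m]
      rw [ih (some m), List.findSome?_append]
      cases hv : vs.reverse.findSome? sc_classify <;> simp [h, hv, List.findSome?]

-- B's scan equals findSome? of the scanned list, packaged as the result dict
theorem sc_scan_eq (l : List String) :
    sc_scan l = match l.findSome? sc_classify with
      | some m => some [("suggestion", m)]
      | none => none := by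
  induction l with
  | nil => rfl
  | cons v rest ih =>
    simp only [sc_scan, List.findSome?]
    cases sc_classify v <;> simp [ih]

-- ===== VERDICT (by name: the statement is the Claim_ definition above) =====
theorem suggest_correction_py_spec : Claim_equal_suggest_correction_py := by
  intro primitive violations _
  unfold Spec_suggest_correction_py suggest_correction_py suggest_correction_py_alt
  show (if (List.foldl sc_stepA (sc_dictOf none) violations).items = [] then none
        else some (List.foldl sc_stepA (sc_dictOf none) violations).items)
      = sc_scan violations.reverse
  rw [sc_foldl_eq_scan, sc_scan_eq]
  cases violations.reverse.findSome? sc_classify <;>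
    simp [sc_dictOf, PySem.Dict.empty]
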